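-- pv_equiv track=rewrite | github.com/kfuku52/genegalleon | workflow/support/csubst_site_wrapper.py | get_cb_required_columns
-- ===== SOURCE A (Python) =====
-- def get_cb_required_columns(cb_columns, trait_names):
--     required = {
--         'orthogroup',
--         'OCNany2spe',
--         'ECNany2spe',
--         'OCSany2spe',
--         'ECSany2spe',
--         'omegaCany2spe',
--         'OCNCoD',
--     }
--     required.update(col for col in cb_columns if col.startswith('branch_id_'))
--     if 'is_fg' in cb_columns:
--         required.add('is_fg')
--     else:
--         required.update(f'is_fg_{trait}' for trait in trait_names if f'is_fg_{trait}' in cb_columns)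
--     if 'branch_num_fg_stem' in cb_columns:
--         required.add('branch_num_fg_stem')
--     else:
--         required.update(
--             f'branch_num_fg_stem_{trait}'
--             for trait in trait_names
--             if f'branch_num_fg_stem_{trait}' in cb_columns
--         )
--     return [col for col in cb_columns if col in required]
-- ===== SOURCE B (Python) =====
-- def get_cb_required_columns(cb_columns, trait_names):
--     base = {
--         'orthogroup',
--         'OCNany2spe',
--         'ECNany2spe',
--         'OCSany2spe',
--         'ECSany2spe',
--         'omegaCany2spe',
--         'OCNCoD',
--     }
--     has_fg = 'is_fg' in cb_columns
--     has_bn = 'branch_num_fg_stem' in cb_columns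
--     traits = set(trait_names)
--     return [
--         col
--         for col in cb_columns
--         if col in base
--         or col.startswith('branch_id_')
--         or (col == 'is_fg' if has_fg else col.startswith('is_fg_') and col[6:] in traits)
--         or (col == 'branch_num_fg_stem' if has_bn
--             else col.startswith('branch_num_fg_stem_') and col[19:] in traits)
--     ]
-- ===== Notes on version B (the rewrite author's own statement) =====
-- stated objective: faster
-- what changed: A builds a 'required' set (base names, branch_id_ columns, and per-trait 'f-string in cb_columns' list scans) and then filters cb_columns by set membership; B precomputes two flags and a set of trait names and does one pass over cb_columns with a compound predicate that parses each column's prefix/suffix, so the per-trait list scans disappear.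
import Mathlib
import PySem

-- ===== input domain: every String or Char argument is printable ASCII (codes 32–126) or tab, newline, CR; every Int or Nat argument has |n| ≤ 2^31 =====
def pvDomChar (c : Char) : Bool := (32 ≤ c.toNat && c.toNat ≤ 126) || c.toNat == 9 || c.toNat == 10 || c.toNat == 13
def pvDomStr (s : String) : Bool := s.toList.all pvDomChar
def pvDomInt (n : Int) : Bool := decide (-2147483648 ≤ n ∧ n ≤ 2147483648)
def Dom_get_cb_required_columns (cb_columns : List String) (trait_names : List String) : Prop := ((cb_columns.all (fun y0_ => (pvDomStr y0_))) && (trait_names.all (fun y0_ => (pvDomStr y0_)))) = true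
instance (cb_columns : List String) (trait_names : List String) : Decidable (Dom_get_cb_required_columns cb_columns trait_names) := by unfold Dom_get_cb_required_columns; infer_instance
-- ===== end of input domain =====

-- B replaces A's build-required-set-then-filter with one compound-predicate pass
-- (flags + trait set precomputed, per-trait list scans gone); return values are equal.

-- ===== PORT A =====
def get_cb_required_columns (cb_columns : List String) (trait_names : List String) : List String :=
  let required : PySem.Set String := PySem.Set.ofList
    ["orthogroup", "OCNany2spe", "ECNany2spe", "OCSany2spe", "ECSany2spe", "omegaCany2spe", "OCNCoD"]
  let required := PySem.Set.update required
    (cb_columns.filter (fun col => PySem.Str.startswith col "branch_id_"))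
  let required :=
    if cb_columns.contains "is_fg" then PySem.Set.add required "is_fg"
    else PySem.Set.update required
      ((trait_names.map (fun trait => "is_fg_" ++ trait)).filter (fun s => cb_columns.contains s))
  let required :=
    if cb_columns.contains "branch_num_fg_stem" then PySem.Set.add required "branch_num_fg_stem"
    else PySem.Set.update required
      ((trait_names.map (fun trait => "branch_num_fg_stem_" ++ trait)).filter (fun s => cb_columns.contains s))
  cb_columns.filter (fun col => PySem.Set.contains required col)

-- ===== PORT B =====
def get_cb_required_columns_alt (cb_columns : List String) (trait_names : List String) : List String :=
  let base : PySem.Set String := PySem.Set.ofList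
    ["orthogroup", "OCNany2spe", "ECNany2spe", "OCSany2spe", "ECSany2spe", "omegaCany2spe", "OCNCoD"]
  let has_fg := cb_columns.contains "is_fg"
  let has_bn := cb_columns.contains "branch_num_fg_stem"
  let traits : PySem.Set String := PySem.Set.ofList trait_names
  cb_columns.filter (fun col =>
    PySem.Set.contains base col
    || PySem.Str.startswith col "branch_id_"
    || (if has_fg then col == "is_fg"
        else PySem.Str.startswith col "is_fg_"
          && PySem.Set.contains traits (PySem.Str.slice col (some 6) none))
    || (if has_bn then col == "branch_num_fg_stem"
        else PySem.Str.startswith col "branch_num_fg_stem_"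
          && PySem.Set.contains traits (PySem.Str.slice col (some 19) none)))

-- ===== PRECONDITION & SPEC =====
def Spec_get_cb_required_columns (cb_columns : List String) (trait_names : List String) (out : List String) : Prop := out = get_cb_required_columns_alt cb_columns trait_names
instance (cb_columns : List String) (trait_names : List String) (out : List String) : Decidable (Spec_get_cb_required_columns cb_columns trait_names out) := by unfold Spec_get_cb_required_columns; infer_instance

-- ===== CLAIM (what is proved, stated in full; the proofs are below) =====
def Claim_equal_get_cb_required_columns : Prop := ∀ (cb_columns : List String) (trait_names : List String), Dom_get_cb_required_columns cb_columns trait_names → Spec_get_cb_required_columns cb_columns trait_names (get_cb_required_columns cb_columns trait_names)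

-- ===== LEMMAS AND PROOFS =====

-- s[a:] as a char list, for 0 <= a
theorem pvSliceToList (col : String) (a : Int) (h : 0 ≤ a) :
    (PySem.Str.slice col (some a) none).toList = col.toList.drop a.toNat := by
  rw [PySem.Str.toList_slice, PySem.Chars.slice_eq_listSlice, PySem.List.slice_from _ h]

-- A's "prefix ++ trait drawn from trait_names, kept if it is a column" guard is, for a column
-- already known to be in cb_columns, exactly "starts with the prefix and the suffix is a trait".
theorem pvClause (cb tn : List String) (col pre : String) (hcol : col ∈ cb) :
    (col ∈ (tn.map (fun t => pre ++ t)).filter (fun s => cb.contains s))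
      ↔ (pre.toList <+: col.toList ∧ ∃ t ∈ tn, t.toList = col.toList.drop pre.toList.length) := by
  simp only [List.mem_filter, List.mem_map]
  constructor
  · rintro ⟨⟨t, ht, rfl⟩, -⟩
    exact ⟨⟨t.toList, by simp⟩, t, ht, by simp⟩
  · rintro ⟨⟨u, hu⟩, t, ht, hdrop⟩
    have hcoleq : pre ++ t = col := by
      rw [← String.toList_inj, String.toList_append, hdrop, ← hu, List.drop_left]
    refine ⟨⟨t, ht, hcoleq⟩, ?_⟩
    simpa using hcol

-- membership of a suffix-slice in the trait set, as the existential pvClause produces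
theorem pvSliceMem (tn : List String) (col : String) (k : Nat) :
    (PySem.Str.slice col (some (k : Int)) none ∈ tn)
      ↔ ∃ t ∈ tn, t.toList = col.toList.drop k := by
  constructor
  · intro h
    refine ⟨_, h, ?_⟩
    rw [pvSliceToList col k (by positivity), Int.toNat_natCast]
  · rintro ⟨t, ht, hteq⟩
    have hst : PySem.Str.slice col (some (k : Int)) none = t := by
      rw [← String.toList_inj, pvSliceToList col k (by positivity), Int.toNat_natCast, hteq]
    rw [hst]; exact ht

-- the two filter predicates agree on every element of cb_columns
set_option maxHeartbeats 1000000 in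
theorem pvPredEq (cb tn : List String) (col : String) (hcol : col ∈ cb) :
    (PySem.Set.contains
      (let required : PySem.Set String := PySem.Set.ofList
        ["orthogroup", "OCNany2spe", "ECNany2spe", "OCSany2spe", "ECSany2spe", "omegaCany2spe", "OCNCoD"]
       let required := PySem.Set.update required
         (cb.filter (fun col => PySem.Str.startswith col "branch_id_"))
       let required :=
         if cb.contains "is_fg" then PySem.Set.add required "is_fg"
         else PySem.Set.update required
           ((tn.map (fun trait => "is_fg_" ++ trait)).filter (fun s => cb.contains s))
       if cb.contains "branch_num_fg_stem" then PySem.Set.add required "branch_num_fg_stem"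
       else PySem.Set.update required
         ((tn.map (fun trait => "branch_num_fg_stem_" ++ trait)).filter (fun s => cb.contains s)))
      col)
    = (PySem.Set.contains (PySem.Set.ofList
        ["orthogroup", "OCNany2spe", "ECNany2spe", "OCSany2spe", "ECSany2spe", "omegaCany2spe", "OCNCoD"]) col
      || PySem.Str.startswith col "branch_id_"
      || (if cb.contains "is_fg" then col == "is_fg"
          else PySem.Str.startswith col "is_fg_"
            && PySem.Set.contains (PySem.Set.ofList tn) (PySem.Str.slice col (some 6) none))
      || (if cb.contains "branch_num_fg_stem" then col == "branch_num_fg_stem"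
          else PySem.Str.startswith col "branch_num_fg_stem_"
            && PySem.Set.contains (PySem.Set.ofList tn) (PySem.Str.slice col (some 19) none))) := by
  have hbid : col ∈ cb.filter (fun c => PySem.Str.startswith c "branch_id_")
      ↔ PySem.Str.startswith col "branch_id_" = true := by
    simp [List.mem_filter, hcol]
  have hfg := pvClause cb tn col "is_fg_" hcol
  have hbn := pvClause cb tn col "branch_num_fg_stem_" hcol
  have h6 : ("is_fg_" : String).toList.length = 6 := by decide
  have h19 : ("branch_num_fg_stem_" : String).toList.length = 19 := by decide
  rw [h6] at hfg
  rw [h19] at hbn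
  have hs6 : (PySem.Set.contains (PySem.Set.ofList tn) (PySem.Str.slice col (some 6) none) = true)
      ↔ ∃ t ∈ tn, t.toList = col.toList.drop 6 := by
    rw [PySem.Set.contains_iff, PySem.Set.mem_ofList]
    exact_mod_cast pvSliceMem tn col 6
  have hs19 : (PySem.Set.contains (PySem.Set.ofList tn) (PySem.Str.slice col (some 19) none) = true)
      ↔ ∃ t ∈ tn, t.toList = col.toList.drop 19 := by
    rw [PySem.Set.contains_iff, PySem.Set.mem_ofList]
    exact_mod_cast pvSliceMem tn col 19
  have hsw : ∀ pre : String, (PySem.Str.startswith col pre = true) ↔ pre.toList <+: col.toList := by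
    intro pre
    rw [PySem.Str.startswith_eq]
    exact PySem.Chars.startswith_iff _ _
  rw [Bool.eq_iff_iff]
  rcases Bool.eq_false_or_eq_true (cb.contains "is_fg") with h1 | h1 <;>
  rcases Bool.eq_false_or_eq_true (cb.contains "branch_num_fg_stem") with h2 | h2 <;>
    simp only [h1, h2, eq_self_iff_true, if_true, Bool.false_eq_true, if_false,
      PySem.Set.contains_iff, PySem.Set.mem_add, PySem.Set.mem_update, PySem.Set.mem_ofList,
      Bool.or_eq_true, Bool.and_eq_true, beq_iff_eq, hbid, hfg, hbn, hsw, hs6, hs19] <;>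
    tauto

-- ===== VERDICT (by name: the statement is the Claim_ definition above) =====
theorem get_cb_required_columns_spec : Claim_equal_get_cb_required_columns := by
  intro cb tn _
  unfold Spec_get_cb_required_columns
  unfold get_cb_required_columns get_cb_required_columns_alt
  exact List.filter_congr (fun col hcol => pvPredEq cb tn col hcol)
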